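-- pv_equiv track=rewrite | github.com/sammarth-k/chandralc | chandralc/analysis.py | bin_lc
-- ===== SOURCE A (Python) =====
-- def bin_lc(lightcurve, binsize):
--     """Bins photon counts.
--
--     Parameters
--     ----------
--     lc: ChandraLightcurve
--         ChandraLightcurve object
--     binsize : int
--         Size of bin
--
--     Returns
--     -------
--     list
--         Array of net counts per bin.
--     """
--     binned_photons = []
--
--     # range: total number of df points over included bins --> temp3 of intervals
--     for j in range(0, len(lightcurve) // binsize):
--         bin_count = 0
--         j *= binsize
--         for k in range(binsize):
--             # sum of all photons within one interval
--             bin_count = bin_count + lightcurve[j + k]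
--
--         # appends that sum to a list
--         binned_photons.append(bin_count)
--
--     return binned_photons
-- ===== SOURCE B (Python) =====
-- def bin_lc(lightcurve, binsize):
--     """Bins photon counts via a prefix-sum table (one pass + differences)."""
--     prefix = [0]
--     acc = 0
--     for x in lightcurve:
--         acc += x
--         prefix.append(acc)
--     nbins = len(lightcurve) // binsize
--     return [prefix[(k + 1) * binsize] - prefix[k * binsize] for k in range(nbins)]
-- ===== Notes on version B (the rewrite author's own statement) =====
-- stated objective: alternative
-- what changed: Replaces the nested re-summing loops with a single prefix-sum accumulation pass followed by a differenced pass over the table.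
import Mathlib
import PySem

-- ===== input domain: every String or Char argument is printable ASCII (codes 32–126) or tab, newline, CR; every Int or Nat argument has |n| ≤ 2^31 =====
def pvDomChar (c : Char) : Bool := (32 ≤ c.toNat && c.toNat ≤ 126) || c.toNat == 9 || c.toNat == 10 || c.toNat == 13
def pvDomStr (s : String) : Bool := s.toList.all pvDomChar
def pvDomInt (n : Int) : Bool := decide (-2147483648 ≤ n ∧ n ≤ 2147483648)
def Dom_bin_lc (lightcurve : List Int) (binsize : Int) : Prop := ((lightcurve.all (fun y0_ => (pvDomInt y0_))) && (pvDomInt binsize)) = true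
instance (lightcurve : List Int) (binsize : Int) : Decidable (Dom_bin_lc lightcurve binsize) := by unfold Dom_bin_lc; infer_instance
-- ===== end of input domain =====

-- B replaces A's nested re-summing loops by one prefix-sum pass plus a differenced pass (alternative algorithm).

-- ===== PORT A =====
-- literal port of A: outer loop over range(len(lc)//binsize), inner loop summing binsize elements
def bin_lc (lightcurve : List Int) (binsize : Int) : List Int :=
  (PySem.List.pyRange 0 (PySem.Int.floordiv lightcurve.length binsize) 1).foldl
    (fun binned_photons j =>
      let j' := j * binsize
      let bin_count :=
        (PySem.List.pyRange 0 binsize 1).foldl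
          (fun bin_count k => bin_count + PySem.List.pyGetD lightcurve (j' + k) 0) 0
      binned_photons ++ [bin_count]) []

-- ===== PORT B =====
-- literal port of Source B: build prefix sums, then difference the table
def bin_lc_alt (lightcurve : List Int) (binsize : Int) : List Int :=
  let pa := lightcurve.foldl
    (fun (st : List Int × Int) x =>
      let acc := st.2 + x
      (st.1 ++ [acc], acc)) ([0], 0)
  let pre := pa.1
  let nbins := PySem.Int.floordiv lightcurve.length binsize
  (PySem.List.pyRange 0 nbins 1).map
    (fun k => PySem.List.pyGetD pre ((k + 1) * binsize) 0 - PySem.List.pyGetD pre (k * binsize) 0)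

-- ===== PRECONDITION & SPEC =====
-- Pre_ excludes only binsize = 0, where Python A raises ZeroDivisionError (so does B).
def Pre_bin_lc (lightcurve : List Int) (binsize : Int) : Prop := binsize ≠ 0
instance (lightcurve : List Int) (binsize : Int) : Decidable (Pre_bin_lc lightcurve binsize) := by unfold Pre_bin_lc; infer_instance

def pvWitness_bin_lc : List Int × Int := ([3, 1, 4, 1, 5, 9], 2)

def Spec_bin_lc (lightcurve : List Int) (binsize : Int) (out : List Int) : Prop := out = bin_lc_alt lightcurve binsize
instance (lightcurve : List Int) (binsize : Int) (out : List Int) : Decidable (Spec_bin_lc lightcurve binsize out) := by unfold Spec_bin_lc; infer_instance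

-- ===== CLAIM (what is proved, stated in full; the proofs are below) =====
def Claim_equal_bin_lc : Prop := ∀ (lightcurve : List Int) (binsize : Int), Dom_bin_lc lightcurve binsize → Pre_bin_lc lightcurve binsize → Spec_bin_lc lightcurve binsize (bin_lc lightcurve binsize)

-- ===== LEMMAS AND PROOFS =====

theorem seg_map (lc : List Int) (m j : Nat) (h : j + m ≤ lc.length) :
    (List.range m).map (fun k => lc.getD (j+k) 0) = (lc.drop j).take m := by
  apply List.ext_getElem
  · simp; omega
  · intro i h1 h2
    simp only [List.getElem_map, List.getElem_range, List.getD_eq_getElem?_getD,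
      List.getElem_take, List.getElem_drop]
    rw [List.getElem?_eq_getElem (by simp at h1; omega)]
    simp at h1 ⊢

-- L2
theorem pvInnerSum (lc : List Int) (b j' : Int) (hb : 0 < b) (hj : 0 ≤ j')
    (hle : j' + b ≤ lc.length) :
    (PySem.List.pyRange 0 b 1).foldl (fun c k => c + PySem.List.pyGetD lc (j' + k) 0) 0
      = ((lc.drop j'.toNat).take b.toNat).sum := by
  rw [PySem.List.pyRange_one, List.foldl_map, PySem.List.foldl_add]
  simp only [zero_add, Int.sub_zero]
  rw [show (fun y : Nat => PySem.List.pyGetD lc (j' + y) 0) = fun k : Nat => lc.getD (j'.toNat + k) 0 from ?_, seg_map lc b.toNat j'.toNat (by omega)]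
  · funext k
    rw [show j' + (k:Int) = ((j'.toNat + k : Nat) : Int) by omega, PySem.List.pyGetD_natCast]

theorem pvPrefixTable (lc : List Int) :
    ([0] ++ (List.range lc.length).map (fun i => (lc.take (i + 1)).sum))
      = (List.range (lc.length + 1)).map (fun i => (lc.take i).sum) := by
  rw [List.range_succ_eq_map]
  simp [Function.comp_def]

theorem pvPrefixGet (lc : List Int) (i : Int) (h0 : 0 ≤ i) (h1 : i ≤ lc.length) :
    PySem.List.pyGetD ((List.range (lc.length + 1)).map (fun i => (lc.take i).sum)) i 0
      = (lc.take i.toNat).sum := by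
  have hk : i.toNat < lc.length + 1 := by omega
  rw [show i = ((i.toNat : Nat) : Int) by omega, PySem.List.pyGetD_natCast,
    PySem.List.getD_map_range (h := hk)]
  simp
  rw [show max i 0 = i by omega]


-- B's prefix accumulation produces the table of partial sums.
theorem scan_spec (lc : List Int) (p : List Int) (a : Int) :
    (lc.foldl (fun (st : List Int × Int) x => (st.1 ++ [st.2 + x], st.2 + x)) (p, a)).1
      = p ++ (List.range lc.length).map (fun i => a + (lc.take (i + 1)).sum) := by
  induction lc generalizing p a with
  | nil => simp
  | cons x xs ih =>
    simp only [List.foldl_cons, ih, List.length_cons, List.range_succ_eq_map, List.map_cons,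
      List.map_map, List.take_succ_cons, List.sum_cons, List.append_assoc]
    simp [Function.comp_def, add_assoc]

theorem binval (lc : List Int) (b j : Int) (hb : 0 < b) (hj : 0 ≤ j) :
    (lc.take ((j + 1) * b).toNat).sum - (lc.take ((j * b).toNat)).sum
      = ((lc.drop (j * b).toNat).take b.toNat).sum := by
  have h1 : ((j + 1) * b).toNat = (j * b).toNat + b.toNat := by
    have : 0 ≤ j * b := mul_nonneg hj (le_of_lt hb)
    have : (j + 1) * b = j * b + b := by ring
    omega
  rw [h1, List.take_add, List.sum_append]
  ring

theorem bin_lc_spec : Claim_equal_bin_lc := by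
  intro lc b _ hb
  unfold Spec_bin_lc bin_lc bin_lc_alt
  rw [PySem.List.foldl_append_singleton_eq_map]
  simp only [List.nil_append]
  replace hb : b ≠ 0 := hb
  rw [scan_spec]
  simp only [zero_add]
  rw [pvPrefixTable]
  rcases lt_or_gt_of_ne hb with hneg | hpos
  · -- negative binsize: zero bins on both sides
    have hq : PySem.Int.floordiv lc.length b ≤ 0 := by
      have hmod := PySem.Int.floordiv_mul_add_mod (lc.length) b
      have hbounds := PySem.Int.mod_neg_bounds (a := (lc.length : Int)) hneg
      nlinarith [Int.natCast_nonneg lc.length]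
    rw [PySem.List.pyRange_one_eq_nil hq]
    simp
  · apply List.map_congr_left
    intro j hj
    rw [PySem.List.mem_pyRange_one] at hj
    obtain ⟨hj0, hjq⟩ := hj
    have hqb : PySem.Int.floordiv lc.length b * b ≤ lc.length := by
      have hmod := PySem.Int.floordiv_mul_add_mod (lc.length) b
      have := PySem.Int.mod_nonneg (a := (lc.length : Int)) hpos
      omega
    have hle : (j + 1) * b ≤ lc.length := by
      have : (j + 1) * b ≤ PySem.Int.floordiv lc.length b * b :=
        mul_le_mul_of_nonneg_right (by omega) (le_of_lt hpos)
      omega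
    rw [pvPrefixGet lc ((j + 1) * b) (by positivity) (by omega),
      pvPrefixGet lc (j * b) (mul_nonneg hj0 (le_of_lt hpos)) (by nlinarith),
      pvInnerSum lc b (j * b) hpos (mul_nonneg hj0 (le_of_lt hpos)) (by nlinarith),
      binval lc b j hpos hj0]
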